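-- pv_equiv track=rewrite | github.com/ohmema/interview | python/interviews/recursion/arithmeticExpression.py | _calculate
-- ===== SOURCE A (Python) =====
-- def _calculate(arr, i, result, out):
--     if len(arr) == i and result % 101 == 0:
--         return out
--     elif len(arr) == i and result % 101 != 0:
--         return ""
--
--     num = arr[i]
--     re = _calculate(arr, i + 1, result * num, out + "*" + str(num))
--     if re != '':
--         return re
--
--     re = _calculate(arr, i + 1, result + num, out + "+" + str(num))
--     if re != '':
--         return re
--
--     re = _calculate(arr, i + 1, result - num, out + "-" + str(num))
--     if re != '':
--         return re
--
--     return ''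
-- ===== SOURCE B (Python) =====
-- def _table(nums):
--     # suffix-feasibility tables: _table(nums)[j] = set of residues r (mod 101) from which
--     # the suffix nums[j:] can be completed to a product/sum divisible by 101
--     if not nums:
--         return [{0}]
--     rest = _table(nums[1:])
--     a = nums[0]
--     nxt = rest[0]
--     cur = {r for r in range(101)
--            if (r * a) % 101 in nxt or (r + a) % 101 in nxt or (r - a) % 101 in nxt}
--     return [cur] + rest
--
--
-- def _greedy(nums, table, r, out):
--     # reconstruct the first feasible operator string in '*','+','-' preference order
--     if not nums:
--         return out
--     a = nums[0]
--     nxt = table[1]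
--     if (r * a) % 101 in nxt:
--         return _greedy(nums[1:], table[1:], (r * a) % 101, out + "*" + str(a))
--     if (r + a) % 101 in nxt:
--         return _greedy(nums[1:], table[1:], (r + a) % 101, out + "+" + str(a))
--     return _greedy(nums[1:], table[1:], (r - a) % 101, out + "-" + str(a))
--
--
-- def _calculate(arr, i, result, out):
--     nums = [arr[j] for j in range(i, len(arr))]   # the elements A's recursion visits from position i
--     table = _table(nums)
--     r = result % 101
--     if r not in table[0]:
--         return ""
--     return _greedy(nums, table, r, out)
-- ===== Notes on version B (the rewrite author's own statement) =====
-- stated objective: alternative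
-- what changed: A's try-*-then-+-then-- backtracking search is replaced by a suffix-feasibility table over residues mod 101 plus a greedy reconstruction in the same */+/- preference order.
import Mathlib
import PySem

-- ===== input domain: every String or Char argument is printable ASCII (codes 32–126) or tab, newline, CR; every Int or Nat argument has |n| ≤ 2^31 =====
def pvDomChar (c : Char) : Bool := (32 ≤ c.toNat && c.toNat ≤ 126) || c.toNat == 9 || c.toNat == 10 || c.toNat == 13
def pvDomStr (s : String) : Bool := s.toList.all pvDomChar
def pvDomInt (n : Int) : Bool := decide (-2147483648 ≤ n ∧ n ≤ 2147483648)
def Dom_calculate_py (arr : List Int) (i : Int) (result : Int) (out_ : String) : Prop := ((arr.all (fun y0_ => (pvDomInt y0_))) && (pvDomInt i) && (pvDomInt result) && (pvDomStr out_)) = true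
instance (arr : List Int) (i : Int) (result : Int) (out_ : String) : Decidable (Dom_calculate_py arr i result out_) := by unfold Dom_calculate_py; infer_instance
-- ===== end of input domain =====

-- B: instead of A's try-*-then-+-then-- backtracking search, a suffix-feasibility table over
-- residues mod 101 plus a greedy reconstruction in the same */+/- preference order (alternative algorithm).

-- ===== PORT A =====
def calculate_py (arr : List Int) (i : Int) (result : Int) (out_ : String) : String :=
  if (arr.length : Int) = i ∧ PySem.Int.mod result 101 = 0 then out_
  else if (arr.length : Int) = i ∧ ¬ PySem.Int.mod result 101 = 0 then ""
  else
    match h : PySem.List.pyGet? arr i with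
    | none => ""   -- Python raises IndexError here (outside Pre_)
    | some num =>
      let re := calculate_py arr (i + 1) (result * num) (out_ ++ "*" ++ PySem.Int.toStr num)
      if re ≠ "" then re
      else
        let re := calculate_py arr (i + 1) (result + num) (out_ ++ "+" ++ PySem.Int.toStr num)
        if re ≠ "" then re
        else
          let re := calculate_py arr (i + 1) (result - num) (out_ ++ "-" ++ PySem.Int.toStr num)
          if re ≠ "" then re
          else ""
termination_by ((arr.length : Int) - i).toNat
decreasing_by
  all_goals
    have hin : PySem.Raise.InRange arr.length i := by
      by_contra hc
      rw [← PySem.List.pyGet?_eq_none_iff] at hc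
      rw [h] at hc
      simp at hc
    simp [PySem.Raise.InRange] at hin
    omega

-- ===== PORT B =====
-- _table(nums)[j] = set of residues r (mod 101) from which the suffix nums[j:]
-- can be completed to a value divisible by 101
def tableB : List Int → List (PySem.Set Int)
  | [] => [PySem.Set.ofList [0]]
  | a :: nums' =>
    let rest := tableB nums'
    let nxt := rest.headD []     -- rest[0]; rest is provably nonempty so Python never raises
    let cur : PySem.Set Int := PySem.Set.ofList ((PySem.List.pyRange 0 101 1).filter (fun r =>
      nxt.contains (PySem.Int.mod (r * a) 101) || nxt.contains (PySem.Int.mod (r + a) 101) ||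
        nxt.contains (PySem.Int.mod (r - a) 101)))
    cur :: rest

-- greedy reconstruction of the first feasible operator string in '*','+','-' preference order
def greedyB : List Int → List (PySem.Set Int) → Int → String → String
  | [], _, _, out => out
  | a :: nums', tbl, r, out =>
    let nxt := (PySem.List.pyGet? tbl 1).getD []   -- table[1]; tbl has ≥ 2 entries in B's calls, Python never raises
    if nxt.contains (PySem.Int.mod (r * a) 101) then
      greedyB nums' (PySem.List.slice tbl (some 1) none) (PySem.Int.mod (r * a) 101) (out ++ "*" ++ PySem.Int.toStr a)
    else if nxt.contains (PySem.Int.mod (r + a) 101) then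
      greedyB nums' (PySem.List.slice tbl (some 1) none) (PySem.Int.mod (r + a) 101) (out ++ "+" ++ PySem.Int.toStr a)
    else
      greedyB nums' (PySem.List.slice tbl (some 1) none) (PySem.Int.mod (r - a) 101) (out ++ "-" ++ PySem.Int.toStr a)

def calculate_py_alt (arr : List Int) (i : Int) (result : Int) (out_ : String) : String :=
  -- nums = [arr[j] for j in range(i, len(arr))]; arr[j] raises IndexError for j < -len(arr) (outside Pre_)
  let nums := (PySem.List.pyRange i arr.length 1).map (fun j => (PySem.List.pyGet? arr j).getD 0)
  let table := tableB nums
  let r := PySem.Int.mod result 101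
  if (table.headD []).contains r = false then ""   -- table[0]; table is provably nonempty
  else greedyB nums table r out_

-- ===== PRECONDITION & SPEC =====
-- Pre_ excludes exactly the inputs on which Python A raises IndexError (i > len(arr),
-- where arr[i] is read before the stop test, and i < -len(arr)); A returns on everything admitted.
def Pre_calculate_py (arr : List Int) (i : Int) (result : Int) (out_ : String) : Prop :=
  -(arr.length : Int) ≤ i ∧ i ≤ arr.length
instance (arr : List Int) (i : Int) (result : Int) (out_ : String) : Decidable (Pre_calculate_py arr i result out_) := by unfold Pre_calculate_py; infer_instance

def pvWitness_calculate_py : List Int × Int × Int × String := ([2, 5, 3], 0, 1, "")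

def Spec_calculate_py (arr : List Int) (i : Int) (result : Int) (out_ : String) (out : String) : Prop := out = calculate_py_alt arr i result out_
instance (arr : List Int) (i : Int) (result : Int) (out_ : String) (out : String) : Decidable (Spec_calculate_py arr i result out_ out) := by unfold Spec_calculate_py; infer_instance

-- ===== CLAIM (what is proved, stated in full; the proofs are below) =====
def Claim_equal_calculate_py : Prop := ∀ (arr : List Int) (i : Int) (result : Int) (out_ : String), Dom_calculate_py arr i result out_ → Pre_calculate_py arr i result out_ → Spec_calculate_py arr i result out_ (calculate_py arr i result out_)

-- ===== LEMMAS AND PROOFS =====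

-- feasibility: can the suffix, applied to accumulator r, reach a multiple of 101?
def goodB : List Int → Int → Bool
  | [], r => PySem.Int.mod r 101 == 0
  | a :: t, r => goodB t (r * a) || goodB t (r + a) || goodB t (r - a)

-- A's recursion, rebased onto an explicit suffix list
def runA : List Int → Int → String → String
  | [], r, o => if PySem.Int.mod r 101 = 0 then o else ""
  | a :: t, r, o =>
    let re1 := runA t (r * a) (o ++ "*" ++ PySem.Int.toStr a)
    if re1 ≠ "" then re1
    else
      let re2 := runA t (r + a) (o ++ "+" ++ PySem.Int.toStr a)
      if re2 ≠ "" then re2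
      else
        let re3 := runA t (r - a) (o ++ "-" ++ PySem.Int.toStr a)
        if re3 ≠ "" then re3
        else ""

-- the operator string the preferred (*,+,-) successful branch produces
def ostr : List Int → Int → String
  | [], _ => ""
  | a :: t, r =>
    if goodB t (r * a) then "*" ++ PySem.Int.toStr a ++ ostr t (r * a)
    else if goodB t (r + a) then "+" ++ PySem.Int.toStr a ++ ostr t (r + a)
    else "-" ++ PySem.Int.toStr a ++ ostr t (r - a)

lemma mod101 (x : Int) : PySem.Int.mod x 101 = x % 101 := PySem.Int.mod_eq_emod_of_pos (by norm_num)

lemma goodB_congr : ∀ (t : List Int) (r r' : Int), r % 101 = r' % 101 → goodB t r = goodB t r' := by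
  intro t
  induction t with
  | nil => intro r r' h; simp [goodB, h]
  | cons a t ih =>
    intro r r' h
    have hm : (r * a) % 101 = (r' * a) % 101 := by rw [Int.mul_emod, h, ← Int.mul_emod]
    have ha : (r + a) % 101 = (r' + a) % 101 := by rw [Int.add_emod, h, ← Int.add_emod]
    have hs : (r - a) % 101 = (r' - a) % 101 := by rw [Int.sub_emod, h, ← Int.sub_emod]
    simp only [goodB, ih _ _ hm, ih _ _ ha, ih _ _ hs]

lemma ostr_congr : ∀ (t : List Int) (r r' : Int), r % 101 = r' % 101 → ostr t r = ostr t r' := by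
  intro t
  induction t with
  | nil => intro r r' h; simp [ostr]
  | cons a t ih =>
    intro r r' h
    have hm : (r * a) % 101 = (r' * a) % 101 := by rw [Int.mul_emod, h, ← Int.mul_emod]
    have ha : (r + a) % 101 = (r' + a) % 101 := by rw [Int.add_emod, h, ← Int.add_emod]
    have hs : (r - a) % 101 = (r' - a) % 101 := by rw [Int.sub_emod, h, ← Int.sub_emod]
    simp only [ostr, goodB_congr t _ _ hm, goodB_congr t _ _ ha, ih _ _ hm, ih _ _ ha, ih _ _ hs]

lemma runA_char : ∀ (t : List Int) (r : Int) (o : String), runA t r o = if goodB t r then o ++ ostr t r else "" := by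
  intro t
  induction t with
  | nil =>
    intro r o
    simp only [runA, goodB, ostr]
    split_ifs with h1 h2 h2 <;> simp_all [String.append_empty]
  | cons a t ih =>
    intro r o
    simp only [runA, ih, goodB, ostr]
    by_cases h1 : goodB t (r * a) = true
    · simp [h1, String.append_assoc]
    · by_cases h2 : goodB t (r + a) = true
      · simp [h1, h2, String.append_assoc]
      · by_cases h3 : goodB t (r - a) = true
        · simp [h1, h2, h3, String.append_assoc]
        · simp [h1, h2, h3]

lemma tableB_ne_nil (t : List Int) : tableB t ≠ [] := by
  cases t <;> simp [tableB]

lemma emod101_self (x : Int) : (x % 101) % 101 = x % 101 := Int.emod_emod_of_dvd x dvd_rfl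

lemma table_head_mem : ∀ (nums : List Int) (r : Int), ((tableB nums).headD []).contains r = true ↔ (0 ≤ r ∧ r < 101 ∧ goodB nums r = true) := by
  intro nums
  induction nums with
  | nil =>
    intro r
    constructor
    · intro h
      rw [PySem.Set.contains_iff] at h
      simp [tableB, PySem.Set.mem_ofList] at h
      subst h
      simp [goodB]
    · rintro ⟨h0, h1, h2⟩
      simp [goodB] at h2
      have : r = 0 := by omega
      subst this
      decide
  | cons a t ih =>
    intro r
    rw [PySem.Set.contains_iff]
    simp only [tableB, List.headD_cons, PySem.Set.mem_ofList, List.mem_filter,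
      PySem.List.mem_pyRange_one, mod101, Bool.or_eq_true]
    have hmul : ((tableB t).headD []).contains ((r * a) % 101) = true ↔ goodB t (r * a) = true := by
      rw [ih ((r * a) % 101)]
      have hb1 : 0 ≤ (r * a) % 101 := Int.emod_nonneg _ (by norm_num)
      have hb2 : (r * a) % 101 < 101 := Int.emod_lt_of_pos _ (by norm_num)
      rw [goodB_congr t _ _ (emod101_self (r * a))]
      tauto
    have hadd : ((tableB t).headD []).contains ((r + a) % 101) = true ↔ goodB t (r + a) = true := by
      rw [ih ((r + a) % 101)]
      have hb1 : 0 ≤ (r + a) % 101 := Int.emod_nonneg _ (by norm_num)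
      have hb2 : (r + a) % 101 < 101 := Int.emod_lt_of_pos _ (by norm_num)
      rw [goodB_congr t _ _ (emod101_self (r + a))]
      tauto
    have hsub : ((tableB t).headD []).contains ((r - a) % 101) = true ↔ goodB t (r - a) = true := by
      rw [ih ((r - a) % 101)]
      have hb1 : 0 ≤ (r - a) % 101 := Int.emod_nonneg _ (by norm_num)
      have hb2 : (r - a) % 101 < 101 := Int.emod_lt_of_pos _ (by norm_num)
      rw [goodB_congr t _ _ (emod101_self (r - a))]
      tauto
    simp only [goodB, Bool.or_eq_true, hmul, hadd, hsub]
    tauto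

lemma greedy_char : ∀ (t : List Int) (r : Int) (out : String), goodB t r = true → greedyB t (tableB t) r out = out ++ ostr t r := by
  intro t
  induction t with
  | nil => intro r out _; simp [greedyB, ostr]
  | cons a t ih =>
    intro r out hg
    rcases htb : tableB t with _ | ⟨h0, rest'⟩
    · exact absurd htb (tableB_ne_nil t)
    have hh : (tableB t).headD [] = h0 := by rw [htb]; rfl
    have hcond : ∀ x : Int, (h0.contains (x % 101) = true) ↔ goodB t x = true := by
      intro x
      rw [← hh, table_head_mem, goodB_congr t _ _ (emod101_self x)]
      have hb1 : 0 ≤ x % 101 := Int.emod_nonneg _ (by norm_num)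
      have hb2 : x % 101 < 101 := Int.emod_lt_of_pos _ (by norm_num)
      tauto
    have hget : PySem.List.pyGet? (tableB (a :: t)) 1 = some h0 := by
      show PySem.List.pyGet? (_ :: tableB t) 1 = some h0
      rw [htb]
      simp [PySem.List.pyGet?, PySem.List.pyIdx?]
    have hslice : PySem.List.slice (tableB (a :: t)) (some 1) none = tableB t := by
      rw [PySem.List.slice_from_one]
      rfl
    rw [show greedyB (a :: t) (tableB (a :: t)) r out =
        (let nxt := (PySem.List.pyGet? (tableB (a :: t)) 1).getD []
         if nxt.contains (PySem.Int.mod (r * a) 101) then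
           greedyB t (PySem.List.slice (tableB (a :: t)) (some 1) none) (PySem.Int.mod (r * a) 101) (out ++ "*" ++ PySem.Int.toStr a)
         else if nxt.contains (PySem.Int.mod (r + a) 101) then
           greedyB t (PySem.List.slice (tableB (a :: t)) (some 1) none) (PySem.Int.mod (r + a) 101) (out ++ "+" ++ PySem.Int.toStr a)
         else
           greedyB t (PySem.List.slice (tableB (a :: t)) (some 1) none) (PySem.Int.mod (r - a) 101) (out ++ "-" ++ PySem.Int.toStr a)) from rfl]
    simp only [hget, Option.getD_some, hslice, mod101]
    by_cases h1 : goodB t (r * a) = true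
    · rw [if_pos ((hcond (r * a)).mpr h1)]
      rw [ih _ _ (by rw [goodB_congr t _ _ (emod101_self (r * a))]; exact h1)]
      rw [ostr_congr t _ _ (emod101_self (r * a))]
      simp [ostr, h1, String.append_assoc]
    · rw [if_neg (by rw [hcond (r * a)]; exact h1)]
      by_cases h2 : goodB t (r + a) = true
      · rw [if_pos ((hcond (r + a)).mpr h2)]
        rw [ih _ _ (by rw [goodB_congr t _ _ (emod101_self (r + a))]; exact h2)]
        rw [ostr_congr t _ _ (emod101_self (r + a))]
        simp [ostr, h1, h2, String.append_assoc]
      · rw [if_neg (by rw [hcond (r + a)]; exact h2)]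
        have h3 : goodB t (r - a) = true := by
          have := hg
          simp [goodB, h1, h2] at this
          exact this
        rw [ih _ _ (by rw [goodB_congr t _ _ (emod101_self (r - a))]; exact h3)]
        rw [ostr_congr t _ _ (emod101_self (r - a))]
        simp [ostr, h1, h2, String.append_assoc]

lemma bridgeA (arr : List Int) : ∀ (k : Nat) (i result : Int) (out : String), -(arr.length : Int) ≤ i → i ≤ arr.length → (arr.length : Int) - i = k → calculate_py arr i result out = runA ((PySem.List.pyRange i arr.length 1).map (fun j => (PySem.List.pyGet? arr j).getD 0)) result out := by
  intro k
  induction k with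
  | zero =>
    intro i result out h0 h1 hk
    have hd : PySem.List.pyRange i arr.length 1 = [] := by
      simp [pysem, show (arr.length : Int) ≤ i from by omega]
    rw [calculate_py, hd]
    simp only [List.map_nil, runA]
    have hi : (arr.length : Int) = i := by omega
    split_ifs <;> tauto
  | succ k ihk =>
    intro i result out h0 h1 hk
    have hlt : i < (arr.length : Int) := by omega
    have hget : ∃ num, PySem.List.pyGet? arr i = some num := by
      rcases hv : PySem.List.pyGet? arr i with _ | num
      · rw [PySem.List.pyGet?_eq_none_iff] at hv
        exact absurd (by simp [PySem.Raise.InRange]; omega) hv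
      · exact ⟨num, rfl⟩
    obtain ⟨num, hsome⟩ := hget
    rw [calculate_py]
    rw [if_neg (by rintro ⟨h, -⟩; omega), if_neg (by rintro ⟨h, -⟩; omega)]
    rw [PySem.List.pyRange_one_cons hlt, List.map_cons, hsome]
    split
    · next hnone => simp at hnone
    · next num' hsome' =>
      have hnum : num = num' := by injection hsome'
      subst hnum
      have IH : ∀ (res : Int) (o : String), calculate_py arr (i + 1) res o = runA ((PySem.List.pyRange (i + 1) arr.length 1).map (fun j => (PySem.List.pyGet? arr j).getD 0)) res o :=
        fun res o => ihk (i + 1) res o (by omega) (by omega) (by omega)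
      simp only [runA, IH, Option.getD_some]

lemma altB_runA (nums : List Int) (result : Int) (out : String) :
    (if ((tableB nums).headD []).contains (PySem.Int.mod result 101) = false then ""
     else greedyB nums (tableB nums) (PySem.Int.mod result 101) out) = runA nums result out := by
  rw [runA_char, mod101]
  have hgc : goodB nums (result % 101) = goodB nums result :=
    goodB_congr nums _ _ (emod101_self result)
  by_cases hg : goodB nums result = true
  · have hr : ((tableB nums).headD []).contains (result % 101) = true := by
      rw [table_head_mem]
      exact ⟨Int.emod_nonneg _ (by norm_num), Int.emod_lt_of_pos _ (by norm_num), by rw [hgc]; exact hg⟩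
    rw [hr]
    simp only [Bool.true_eq_false, if_false, hg, if_true]
    rw [greedy_char nums (result % 101) out (by rw [hgc]; exact hg)]
    rw [ostr_congr nums _ _ (emod101_self result)]
  · have hr : ((tableB nums).headD []).contains (result % 101) = false := by
      rw [Bool.eq_false_iff]
      intro hc
      rw [table_head_mem] at hc
      rw [hgc] at hc
      exact hg hc.2.2
    rw [hr]
    simp [hg]

-- ===== VERDICT (by name: the statement is the Claim_ definition above) =====
theorem calculate_py_spec : Claim_equal_calculate_py := by
  intro arr i result out_ _hdom hpre
  obtain ⟨h0, h1⟩ := hpre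
  show calculate_py arr i result out_ = calculate_py_alt arr i result out_
  rw [bridgeA arr ((arr.length : Int) - i).toNat i result out_ h0 h1 (by omega)]
  exact (altB_runA ((PySem.List.pyRange i arr.length 1).map (fun j => (PySem.List.pyGet? arr j).getD 0)) result out_).symm
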